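-- pv_equiv track=rewrite | github.com/NogaUwU/chat-branch-visualizer | generate-icons.py | scale_art
-- ===== SOURCE A (Python) =====
-- def scale_art(art, scale):
--     """Scale 16x16 pixel art to target size using nearest-neighbor."""
--     result = []
--     for row in art:
--         scaled_row = []
--         for cell in row:
--             scaled_row.extend([cell] * scale)
--         for _ in range(scale):
--             result.append(scaled_row[:])
--     return result
-- ===== SOURCE B (Python) =====
-- def scale_art(art, scale):
--     """Scale pixel art by integer factor, computing each output cell directly via i//scale."""
--     result = []
--     for i in range(len(art) * scale):
--         src = art[i // scale]
--         result.append([src[j // scale] for j in range(len(src) * scale)])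
--     return result
-- ===== Notes on version B (the rewrite author's own statement) =====
-- stated objective: alternative
-- what changed: B builds the output by indexing output coordinates (art[i//scale], src[j//scale] over ranges of output length) instead of A's extend-replicate of each row followed by repeated slice-copies.
import Mathlib
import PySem

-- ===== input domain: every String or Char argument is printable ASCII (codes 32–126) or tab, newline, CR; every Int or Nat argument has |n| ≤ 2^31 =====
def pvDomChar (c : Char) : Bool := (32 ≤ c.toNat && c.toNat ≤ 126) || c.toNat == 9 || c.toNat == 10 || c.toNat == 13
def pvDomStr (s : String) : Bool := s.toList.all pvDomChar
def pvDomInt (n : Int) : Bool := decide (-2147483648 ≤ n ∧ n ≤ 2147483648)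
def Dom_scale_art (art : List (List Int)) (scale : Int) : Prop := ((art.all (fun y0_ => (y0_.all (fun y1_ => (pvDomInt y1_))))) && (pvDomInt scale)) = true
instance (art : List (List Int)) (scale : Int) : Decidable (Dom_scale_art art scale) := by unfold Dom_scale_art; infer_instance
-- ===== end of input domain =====

-- B rebuilds each output cell directly from output coordinates via integer division
-- instead of A's per-row extend-replicate followed by repeated slice copies (alternative decomposition).

-- ===== PORT A =====
def scale_art (art : List (List Int)) (scale : Int) : List (List Int) :=
  art.foldl (fun result row =>
    let scaled_row := row.foldl (fun sr cell => sr ++ List.replicate scale.toNat cell) []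
    (PySem.List.pyRange 0 scale 1).foldl (fun res _ => res ++ [scaled_row]) result) []

-- ===== PORT B =====
def scale_art_alt (art : List (List Int)) (scale : Int) : List (List Int) :=
  (PySem.List.pyRange 0 ((art.length : Int) * scale) 1).foldl (fun result i =>
    let src := PySem.List.pyGetD art (PySem.Int.floordiv i scale) []
    result ++ [(PySem.List.pyRange 0 ((src.length : Int) * scale) 1).map
      (fun j => PySem.List.pyGetD src (PySem.Int.floordiv j scale) 0)]) []

-- ===== PRECONDITION & SPEC =====
def Spec_scale_art (art : List (List Int)) (scale : Int) (out : List (List Int)) : Prop := out = scale_art_alt art scale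
instance (art : List (List Int)) (scale : Int) (out : List (List Int)) : Decidable (Spec_scale_art art scale out) := by unfold Spec_scale_art; infer_instance

-- ===== CLAIM (what is proved, stated in full; the proofs are below) =====
def Claim_equal_scale_art : Prop := ∀ (art : List (List Int)) (scale : Int), Dom_scale_art art scale → Spec_scale_art art scale (scale_art art scale)

-- ===== LEMMAS AND PROOFS =====

-- each output index i < l.length * k reads l[i/k]; splitting the range row by row gives the flatMap form
lemma map_range_getD_div {α β : Type} (f : α → β) (d : α) (k : Nat) (hk : 0 < k) :
    ∀ (l : List α), (List.range (l.length * k)).map (fun i => f (l.getD (i / k) d))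
      = l.flatMap (fun row => List.replicate k (f row)) := by
  intro l
  induction l with
  | nil => simp
  | cons a l ih =>
    have hlen : (a :: l).length * k = k + l.length * k := by
      simp [List.length_cons]; ring
    rw [hlen, List.range_add, List.map_append, List.map_map]
    have h1 : (List.range k).map (fun i => f ((a :: l).getD (i / k) d)) = List.replicate k (f a) := by
      have : ∀ i ∈ List.range k, f ((a :: l).getD (i / k) d) = f a := by
        intro i hi
        rw [Nat.div_eq_of_lt (List.mem_range.mp hi)]
        rfl
      rw [List.map_congr_left this, List.map_const', List.length_range]
    have h2 : (List.range (l.length * k)).map ((fun i => f ((a :: l).getD (i / k) d)) ∘ (k + ·))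
        = l.flatMap (fun row => List.replicate k (f row)) := by
      rw [← ih]
      apply List.map_congr_left
      intro i _
      simp only [Function.comp]
      have : (k + i) / k = i / k + 1 := by
        rw [Nat.add_comm, Nat.add_div_right _ hk]
      rw [this, List.getD_cons_succ]
    rw [h1, h2, List.flatMap_cons]

lemma scale_art_eq_flatMap (art : List (List Int)) (scale : Int) :
    scale_art art scale
      = art.flatMap (fun row => List.replicate scale.toNat
          (row.flatMap (fun c => List.replicate scale.toNat c))) := by
  unfold scale_art
  have step : ∀ (result : List (List Int)) (row : List Int),
      (PySem.List.pyRange 0 scale 1).foldl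
        (fun res _ => res ++ [row.foldl (fun sr cell => sr ++ List.replicate scale.toNat cell) []]) result
      = result ++ List.replicate scale.toNat (row.flatMap (fun c => List.replicate scale.toNat c)) := by
    intro result row
    rw [PySem.List.foldl_append_singleton_eq_map, List.map_const', PySem.List.length_pyRange_one,
      PySem.List.foldl_append_eq_flatMap]
    simp
  calc art.foldl (fun result row =>
        (PySem.List.pyRange 0 scale 1).foldl
          (fun res _ => res ++ [row.foldl (fun sr cell => sr ++ List.replicate scale.toNat cell) []]) result) []
      = art.foldl (fun result row =>
          result ++ List.replicate scale.toNat (row.flatMap (fun c => List.replicate scale.toNat c))) [] := by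
        apply PySem.List.foldl_congr_mem
        intro acc row _
        exact step acc row
    _ = _ := by rw [PySem.List.foldl_append_eq_flatMap]; simp

lemma scale_art_alt_eq_flatMap (art : List (List Int)) (scale : Int) :
    scale_art_alt art scale
      = art.flatMap (fun row => List.replicate scale.toNat
          (row.flatMap (fun c => List.replicate scale.toNat c))) := by
  unfold scale_art_alt
  by_cases hpos : 0 < scale
  case neg =>
    have hle : scale ≤ 0 := by omega
    have hz : scale.toNat = 0 := Int.toNat_of_nonpos hle
    have : (art.length : Int) * scale ≤ 0 :=
      mul_nonpos_of_nonneg_of_nonpos (by positivity) hle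
    rw [PySem.List.pyRange_one_eq_nil (by linarith)]
    simp [hz]
  case pos =>
    set k := scale.toNat with hk
    have hks : (k : Int) = scale := Int.toNat_of_nonneg (le_of_lt hpos)
    have hkpos : 0 < k := by omega
    have hlen : (art.length : Int) * scale = ((art.length * k : Nat) : Int) := by
      push_cast [hks]; ring
    rw [hlen, PySem.List.foldl_append_singleton_eq_map, PySem.List.pyRange_one, List.map_map]
    simp only [Int.sub_zero, Int.toNat_natCast, List.nil_append]
    have inner : ∀ (src : List Int),
        (PySem.List.pyRange 0 ((src.length : Int) * scale) 1).map
          (fun j => PySem.List.pyGetD src (PySem.Int.floordiv j scale) 0)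
        = src.flatMap (fun c => List.replicate k c) := by
      intro src
      have hl : (src.length : Int) * scale = ((src.length * k : Nat) : Int) := by
        push_cast [hks]; ring
      rw [hl, PySem.List.pyRange_one, List.map_map]
      simp only [Int.sub_zero, Int.toNat_natCast]
      have : ∀ j ∈ List.range (src.length * k),
          ((fun j => PySem.List.pyGetD src (PySem.Int.floordiv j scale) 0) ∘ (fun n : Nat => (0 : Int) + n)) j
            = src.getD (j / k) 0 := by
        intro j _
        simp only [Function.comp, Int.zero_add]
        rw [← hks, PySem.Int.floordiv_natCast, PySem.List.pyGetD_natCast]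
      rw [List.map_congr_left this]
      exact map_range_getD_div id 0 k hkpos src
    have outer : ∀ i ∈ List.range (art.length * k),
        ((fun i =>
            (PySem.List.pyRange 0
                (((PySem.List.pyGetD art (PySem.Int.floordiv i scale) []).length : Int) * scale) 1).map
              (fun j =>
                PySem.List.pyGetD (PySem.List.pyGetD art (PySem.Int.floordiv i scale) [])
                  (PySem.Int.floordiv j scale) 0)) ∘ (fun n : Nat => (0 : Int) + n)) i
          = (fun src => src.flatMap (fun c => List.replicate k c)) (art.getD (i / k) []) := by
      intro i _
      simp only [Function.comp, Int.zero_add]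
      rw [← hks, PySem.Int.floordiv_natCast, PySem.List.pyGetD_natCast, hks, inner]
    rw [List.map_congr_left outer]
    exact map_range_getD_div (fun src => src.flatMap (fun c => List.replicate k c)) [] k hkpos art

-- ===== VERDICT (by name: the statement is the Claim_ definition above) =====
theorem scale_art_spec : Claim_equal_scale_art := by
  intro art scale _
  unfold Spec_scale_art
  rw [scale_art_eq_flatMap, scale_art_alt_eq_flatMap]
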